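-- pv_equiv track=rewrite | github.com/JesonWS54/AI_Personal | algorithms/Constrained_searching/Testing.py | is_variable_conflicting
-- ===== SOURCE A (Python) =====
-- def is_variable_conflicting(var, assignment):
--     """Kiểm tra xem biến có xung đột không"""
--     if var not in assignment:
--         return False
--     value = assignment[var]
--     for other_var, other_value in assignment.items():
--         if other_var != var and other_value == value:
--             return True
--     return False
-- ===== SOURCE B (Python) =====
-- def is_variable_conflicting(var, assignment):
--     """Kiểm tra xem biến có xung đột không"""
--     if var not in assignment:
--         return False
--     owners = {}
--     for k, v in assignment.items():
--         owners.setdefault(v, []).append(k)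
--     return len(owners[assignment[var]]) > 1
-- ===== Notes on version B (the rewrite author's own statement) =====
-- stated objective: alternative
-- what changed: Instead of A's self-excluding scan over items, B builds an inverse index (value -> list of keys holding it) in one grouping pass and answers by the size of var's value bucket.
import Mathlib
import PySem

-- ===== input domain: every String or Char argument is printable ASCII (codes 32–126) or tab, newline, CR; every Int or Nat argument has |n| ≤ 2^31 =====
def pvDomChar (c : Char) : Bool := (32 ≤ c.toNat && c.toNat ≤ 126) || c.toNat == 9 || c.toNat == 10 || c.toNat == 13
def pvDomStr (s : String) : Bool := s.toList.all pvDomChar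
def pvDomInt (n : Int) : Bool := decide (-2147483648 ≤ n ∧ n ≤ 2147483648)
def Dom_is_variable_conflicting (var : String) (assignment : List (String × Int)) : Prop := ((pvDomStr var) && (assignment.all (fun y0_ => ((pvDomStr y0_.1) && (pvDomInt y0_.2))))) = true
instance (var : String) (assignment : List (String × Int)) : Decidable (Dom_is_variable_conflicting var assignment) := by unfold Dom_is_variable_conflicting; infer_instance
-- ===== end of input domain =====

-- B replaces A's self-excluding scan over items by building an inverse index (value -> keys) and testing var's bucket size; equal on every dict-like input (alternative data structure, same cost).

-- ===== PORT A =====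
-- `var not in assignment` / `assignment[var]` = first-match lookup; the for-loop with early `return True` is `List.any`.
def is_variable_conflicting (var : String) (assignment : List (String × Int)) : Bool :=
  match (PySem.Dict.mk assignment).get? var with
  | none => false
  | some value => assignment.any (fun p => (p.1 != var) && (p.2 == value))

-- ===== PORT B =====
-- owners.setdefault(v, []).append(k)  =  modify v [] (· ++ [k])
def is_variable_conflicting_alt (var : String) (assignment : List (String × Int)) : Bool :=
  match (PySem.Dict.mk assignment).get? var with
  | none => false
  | some value =>
    let owners : PySem.Dict Int (List String) :=
      assignment.foldl (fun d p => d.modify p.2 [] (· ++ [p.1])) PySem.Dict.empty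
    decide (1 < (owners.getD value []).length)

-- ===== PRECONDITION & SPEC =====
-- Pre_ excludes only association lists with duplicate keys: those do not represent a Python dict
-- (a Python dict's keys are unique), so A is never run on them.
def Pre_is_variable_conflicting (var : String) (assignment : List (String × Int)) : Prop :=
  (assignment.map Prod.fst).Nodup
instance (var : String) (assignment : List (String × Int)) : Decidable (Pre_is_variable_conflicting var assignment) := by unfold Pre_is_variable_conflicting; infer_instance

def pvWitness_is_variable_conflicting : String × (List (String × Int)) := ("x", [("x", 1), ("y", 1)])

def Spec_is_variable_conflicting (var : String) (assignment : List (String × Int)) (out : Bool) : Prop := out = is_variable_conflicting_alt var assignment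
instance (var : String) (assignment : List (String × Int)) (out : Bool) : Decidable (Spec_is_variable_conflicting var assignment out) := by unfold Spec_is_variable_conflicting; infer_instance

-- ===== CLAIM (what is proved, stated in full; the proofs are below) =====
def Claim_equal_is_variable_conflicting : Prop := ∀ (var : String) (assignment : List (String × Int)), Dom_is_variable_conflicting var assignment → Pre_is_variable_conflicting var assignment → Spec_is_variable_conflicting var assignment (is_variable_conflicting var assignment)

-- ===== LEMMAS AND PROOFS =====

-- B's bucket for `value` is exactly the keys of the pairs carrying `value`, so its length is the value's multiplicity
theorem pv_bucket_len (value : Int) (l : List (String × Int)) :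
    ((l.foldl (fun d p => d.modify p.2 [] (· ++ [p.1])) PySem.Dict.empty).getD value []).length
      = (l.map Prod.snd).count value := by
  have h := PySem.Dict.getD_foldl_modify_append
      (l := l.map (fun p => (p.2, p.1))) (d := (PySem.Dict.empty : PySem.Dict Int (List String)))
      (c := value)
  rw [List.foldl_map] at h
  simp only [h, PySem.Dict.getD_empty, List.nil_append, List.length_map,
    ← List.countP_eq_length_filter, List.countP_map, List.count]
  rfl

-- a successful lookup contributes at least one occurrence of its value
theorem pv_count_pos (var : String) (value : Int) :
    ∀ (l : List (String × Int)), (PySem.Dict.mk l).get? var = some value →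
      1 ≤ (l.map Prod.snd).count value := by
  intro l
  induction l with
  | nil => simp [PySem.Dict.get?]
  | cons p rest ih =>
    intro h
    rw [PySem.Dict.get?_mk_cons] at h
    by_cases hk : p.1 == var
    · simp [hk] at h
      simp [List.count_cons, ← h]
    · simp [hk] at h
      have := ih h
      simp [List.count_cons]
      omega

-- when var does not occur among the keys, the `p.1 != var` test is vacuous
theorem pv_any_no_key (var : String) (value : Int) :
    ∀ (l : List (String × Int)), (PySem.Dict.mk l).get? var = none →
      (l.any (fun p => (p.1 != var) && (p.2 == value))
        = decide (0 < (l.map Prod.snd).count value)) := by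
  intro l
  induction l with
  | nil => simp
  | cons p rest ih =>
    intro h
    rw [PySem.Dict.get?_mk_cons] at h
    by_cases hk : p.1 == var
    · simp [hk] at h
    · simp [hk] at h
      have hne : (p.1 != var) = true := by simpa [bne] using hk
      by_cases hv : p.2 == value
      · simp [List.any_cons, hne, hv, List.count_cons, eq_comm.mp (eq_of_beq hv)]
      · simp [List.any_cons, hne, hv, List.count_cons, ih h,
          show ¬ (p.2 = value) from fun e => hv (by simp [e])]

-- main lemma: under unique keys, A's scan equals the multiplicity test `1 < count`
theorem pv_main (var : String) (value : Int) :
    ∀ (l : List (String × Int)), (l.map Prod.fst).Nodup →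
      (PySem.Dict.mk l).get? var = some value →
      (l.any (fun p => (p.1 != var) && (p.2 == value))
        = decide (1 < (l.map Prod.snd).count value)) := by
  intro l
  induction l with
  | nil => simp [PySem.Dict.get?]
  | cons p rest ih =>
    intro hnd h
    rw [PySem.Dict.get?_mk_cons] at h
    simp only [List.map_cons, List.nodup_cons] at hnd
    by_cases hk : p.1 == var
    · -- head is var's entry: value = p.2, var absent from rest
      have hpv : p.1 = var := eq_of_beq hk
      simp [hk] at h
      have hrest : (PySem.Dict.mk rest).get? var = none := by
        by_contra hc
        cases hg : (PySem.Dict.mk rest).get? var with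
        | none => exact hc hg
        | some w =>
          have : var ∈ rest.map Prod.fst := by
            clear hc ih hnd
            induction rest with
            | nil => simp [PySem.Dict.get?] at hg
            | cons q t iht =>
              rw [PySem.Dict.get?_mk_cons] at hg
              by_cases hq : q.1 == var
              · simp [eq_of_beq hq]
              · simp [hq] at hg
                simp [iht hg]
          exact hnd.1 (hpv ▸ this)
      have hhead : ((p.1 != var) && (p.2 == value)) = false := by
        simp [hpv]
      rw [List.any_cons, hhead, Bool.false_or,
        pv_any_no_key var value rest hrest]
      simp [h]
    · -- head is not var's entry; var's entry is in rest
      simp [hk] at h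
      have hne : (p.1 != var) = true := by simpa [bne] using hk
      have hc1 := pv_count_pos var value rest h
      rw [List.any_cons, ih hnd.2 h]
      by_cases hv : p.2 == value
      · have h2 : 1 < List.count value (p.2 :: List.map Prod.snd rest) := by
          rw [List.count_cons]
          rw [if_pos (by simp [eq_of_beq hv])]
          omega
        simp [hne, hv, h2]
      · simp [hne, hv, List.count_cons,
          show ¬ (value = p.2) from fun e => hv (by simp [e])]

-- ===== VERDICT (by name: the statement is the Claim_ definition above) =====
theorem is_variable_conflicting_spec : Claim_equal_is_variable_conflicting := by
  intro var assignment _ hpre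
  unfold Spec_is_variable_conflicting is_variable_conflicting is_variable_conflicting_alt
  cases h : (PySem.Dict.mk assignment).get? var with
  | none => rfl
  | some value =>
    simp only [pv_bucket_len]
    exact pv_main var value assignment hpre h
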